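-- pv_equiv track=rewrite | github.com/paneltime/paneltime_gui | src/multi_core.py | get_slave_dicts
-- ===== SOURCE A (Python) =====
-- def get_slave_dicts(d_arr):
--
-- 	d_var={}
-- 	d_node={}
-- 	for d,s in d_arr:
-- 		for key in d:
-- 			if key in d_var:
-- 				raise RuntimeWarning('Slaves returned identical variable names. Some variables will be overwritten')
-- 			d_var[key]=d[key]
-- 			d_node[key]=s
-- 	return d_var,d_node
-- ===== SOURCE B (Python) =====
-- def get_slave_dicts(d_arr):
-- 	d_var = {k: v for d, s in d_arr for k, v in d.items()}
-- 	d_node = {k: s for d, s in d_arr for k in d}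
-- 	if sum(len(d) for d, s in d_arr) != len(d_var):
-- 		raise RuntimeWarning('Slaves returned identical variable names. Some variables will be overwritten')
-- 	return d_var, d_node
-- ===== Notes on version B (the rewrite author's own statement) =====
-- stated objective: simpler
-- what changed: Replaces A's single pass with an inline per-key membership guard by a compute-then-verify structure: both dicts are built unconditionally with comprehensions and a duplicate key is detected afterwards by comparing the total entry count with the merged dict's size (A raises before returning on any duplicate, so raising after building is behaviourally identical).
import Mathlib
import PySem

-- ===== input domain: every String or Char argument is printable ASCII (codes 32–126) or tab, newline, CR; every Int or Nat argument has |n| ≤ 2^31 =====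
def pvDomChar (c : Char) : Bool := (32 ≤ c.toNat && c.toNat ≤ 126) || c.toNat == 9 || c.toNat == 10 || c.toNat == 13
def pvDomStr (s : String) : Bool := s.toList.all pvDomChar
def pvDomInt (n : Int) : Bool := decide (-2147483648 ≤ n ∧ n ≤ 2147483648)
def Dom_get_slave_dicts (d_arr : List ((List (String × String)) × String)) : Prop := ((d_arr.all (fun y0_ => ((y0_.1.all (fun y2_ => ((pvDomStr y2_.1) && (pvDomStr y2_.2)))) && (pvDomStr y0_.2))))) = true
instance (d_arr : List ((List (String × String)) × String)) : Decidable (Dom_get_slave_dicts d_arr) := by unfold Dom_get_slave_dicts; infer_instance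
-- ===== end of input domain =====

-- B replaces A's single pass with an inline duplicate guard by a simpler compute-then-verify
-- structure: build both dicts by comprehensions, then detect duplicates by an entry count.


-- ===== PORT A =====
-- each inner association list stands for a Python dict: PySem.Dict.ofList gives its entries
-- (first-insertion key order, last value wins), exactly Python's dict construction.
-- A's loop threads an Option: `none` is the `raise RuntimeWarning` on a duplicate key.
def pvLoopA (d_arr : List ((List (String × String)) × String)) :
    Option (PySem.Dict String String × PySem.Dict String String) :=
  d_arr.foldl
    (fun st ds =>
      (PySem.Dict.ofList ds.1).keys.foldl
        (fun st key =>
          st.bind (fun p =>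
            if p.1.contains key then none   -- raise RuntimeWarning(…)
            else some (p.1.insert key ((PySem.Dict.ofList ds.1).getD key ""),
                       p.2.insert key ds.2)))
        st)
    (some (PySem.Dict.empty, PySem.Dict.empty))

def get_slave_dicts (d_arr : List ((List (String × String)) × String)) :
    (List (String × String)) × (List (String × String)) :=
  match pvLoopA d_arr with
  | some p => (p.1.items, p.2.items)
  | none => ([], [])        -- unreachable under Pre_: Python raises RuntimeWarning here

-- ===== PORT B =====
def get_slave_dicts_alt (d_arr : List ((List (String × String)) × String)) :
    (List (String × String)) × (List (String × String)) :=
  let d_var := d_arr.foldl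
    (fun acc ds => (PySem.Dict.ofList ds.1).items.foldl (fun a kv => a.insert kv.1 kv.2) acc)
    PySem.Dict.empty
  let d_node := d_arr.foldl
    (fun acc ds => (PySem.Dict.ofList ds.1).keys.foldl (fun a k => a.insert k ds.2) acc)
    PySem.Dict.empty
  let total := d_arr.foldl (fun n ds => n + (PySem.Dict.ofList ds.1).size) (0 : Nat)
  if total = d_var.size then (d_var.items, d_node.items)
  else ([], [])             -- raise RuntimeWarning(…): unreachable under Pre_

-- ===== PRECONDITION & SPEC =====
-- Pre_ excludes exactly the inputs on which the Python raises RuntimeWarning: the same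
-- variable name occurring in two different slave dicts (each dict's own key list is
-- duplicate-free by construction, so this is Nodup of the concatenated key lists).
def Pre_get_slave_dicts (d_arr : List ((List (String × String)) × String)) : Prop :=
  (d_arr.flatMap (fun ds => (PySem.Dict.ofList ds.1).keys)).Nodup
instance (d_arr : List ((List (String × String)) × String)) : Decidable (Pre_get_slave_dicts d_arr) := by unfold Pre_get_slave_dicts; infer_instance

def pvWitness_get_slave_dicts : (List ((List (String × String)) × String)) :=
  [([("a", "1")], "s0"), ([("b", "2"), ("c", "3")], "s1")]

def Spec_get_slave_dicts (d_arr : List ((List (String × String)) × String)) (out : (List (String × String)) × (List (String × String))) : Prop := out = get_slave_dicts_alt d_arr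
instance (d_arr : List ((List (String × String)) × String)) (out : (List (String × String)) × (List (String × String))) : Decidable (Spec_get_slave_dicts d_arr out) := by unfold Spec_get_slave_dicts; infer_instance

-- ===== CLAIM (what is proved, stated in full; the proofs are below) =====
def Claim_equal_get_slave_dicts : Prop := ∀ (d_arr : List ((List (String × String)) × String)), Dom_get_slave_dicts d_arr → Pre_get_slave_dicts d_arr → Spec_get_slave_dicts d_arr (get_slave_dicts d_arr)

-- ===== LEMMAS AND PROOFS =====

-- Set.update by fresh, duplicate-free elements is plain append.
theorem pv_update_fresh (s xs : List String) (h : (s ++ xs).Nodup) :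
    PySem.Set.update s xs = s ++ xs := by
  induction xs generalizing s with
  | nil => simp [PySem.Set.update]
  | cons x t ih =>
      have hx : x ∉ s := by
        intro hmem
        exact (List.nodup_append.mp h).2.2 x hmem x (by simp) rfl
      have : PySem.Set.add s x = s ++ [x] := PySem.Set.add_of_not_mem hx
      simp only [PySem.Set.update, List.foldl_cons] at *
      rw [this, ih (s ++ [x]) (by simpa using h)]
      simp

-- the Option-threaded inner loop over fresh, duplicate-free pairs never raises and
-- performs exactly the two unconditional insert loops
theorem pv_inner_opt (s : String) (l : List (String × String))
    (dv dn : PySem.Dict String String)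
    (hfresh : ∀ kv ∈ l, dv.contains kv.1 = false)
    (hnd : (l.map Prod.fst).Nodup) :
    l.foldl
      (fun st kv => st.bind (fun p =>
        if p.1.contains kv.1 then none
        else some (p.1.insert kv.1 kv.2, p.2.insert kv.1 s)))
      (some (dv, dn))
    = some (l.foldl (fun a kv => a.insert kv.1 kv.2) dv,
            l.foldl (fun a kv => a.insert kv.1 s) dn) := by
  induction l generalizing dv dn with
  | nil => rfl
  | cons kv t ih =>
      have h0 : dv.contains kv.1 = false := hfresh kv (by simp)
      simp only [List.foldl_cons, Option.bind_some, h0]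
      apply ih
      · intro kv' h'
        rw [PySem.Dict.contains_insert]
        have hne : kv'.1 ≠ kv.1 := by
          simp only [List.map_cons, List.nodup_cons] at hnd
          intro he; exact hnd.1 (he ▸ List.mem_map_of_mem h')
        simp [hne, hfresh kv' (by simp [h'])]
      · simpa using hnd.of_cons

-- keys added by the B-side variable-dict inner insert loop
theorem pv_keys_var (l : List (String × String)) (acc : PySem.Dict String String) :
    (l.foldl (fun a kv => a.insert kv.1 kv.2) acc).keys = PySem.Set.update acc.keys (l.map Prod.fst) :=
  PySem.Dict.keys_foldl_insert_key l Prod.fst (fun _ kv => kv.2) acc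

-- main invariant: over dicts whose concatenated key lists are duplicate-free and fresh
-- for both accumulators, A's guarded loop equals B's two unconditional build loops,
-- and the accumulated key lists simply extend by the new keys.
theorem pv_main (d_arr : List ((List (String × String)) × String))
    (dv dn : PySem.Dict String String)
    (hnd : (dv.keys ++ d_arr.flatMap (fun ds => (PySem.Dict.ofList ds.1).keys)).Nodup)
    (hkeys : dn.keys = dv.keys) :
    d_arr.foldl
      (fun st ds =>
        (PySem.Dict.ofList ds.1).keys.foldl
          (fun st key =>
            st.bind (fun p =>
              if p.1.contains key then none
              else some (p.1.insert key ((PySem.Dict.ofList ds.1).getD key ""),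
                         p.2.insert key ds.2)))
          st)
      (some (dv, dn))
    = some
        (d_arr.foldl (fun acc ds => (PySem.Dict.ofList ds.1).items.foldl (fun a kv => a.insert kv.1 kv.2) acc) dv,
         d_arr.foldl (fun acc ds => (PySem.Dict.ofList ds.1).keys.foldl (fun a k => a.insert k ds.2) acc) dn)
      ∧ (d_arr.foldl (fun acc ds => (PySem.Dict.ofList ds.1).items.foldl (fun a kv => a.insert kv.1 kv.2) acc) dv).keys
          = dv.keys ++ d_arr.flatMap (fun ds => (PySem.Dict.ofList ds.1).keys) := by
  induction d_arr generalizing dv dn with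
  | nil => simp
  | cons ds t ih =>
      have hkd : (PySem.Dict.ofList ds.1).keys = (PySem.Dict.ofList ds.1).items.map Prod.fst := rfl
      have hndk : (PySem.Dict.ofList ds.1).keys.Nodup := PySem.Dict.nodup_keys_ofList ds.1
      have hnd' : (dv.keys ++ ((PySem.Dict.ofList ds.1).keys ++ t.flatMap (fun ds => (PySem.Dict.ofList ds.1).keys))).Nodup := by
        simpa using hnd
      have hnd2 : ((dv.keys ++ (PySem.Dict.ofList ds.1).keys) ++ t.flatMap (fun ds => (PySem.Dict.ofList ds.1).keys)).Nodup := by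
        simpa [List.append_assoc] using hnd'
      -- freshness of this dict's keys for dv
      have hfresh : ∀ kv ∈ (PySem.Dict.ofList ds.1).items, dv.contains kv.1 = false := by
        intro kv h'
        have hk : kv.1 ∈ (PySem.Dict.ofList ds.1).keys := by
          rw [hkd]; exact List.mem_map_of_mem h'
        have hnm : kv.1 ∉ dv.keys := by
          intro hmem
          exact (List.nodup_append.mp hnd').2.2 kv.1 hmem kv.1 (by simp [hk]) rfl
        cases hc : dv.contains kv.1 with
        | false => rfl
        | true => exact absurd ((PySem.Dict.contains_iff_mem_keys dv kv.1).1 hc) hnm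
      -- rewrite A's inner fold over keys as a fold over items with the literal value
      have hcongr := PySem.List.foldl_congr_mem
        (l := (PySem.Dict.ofList ds.1).items) (init := (some (dv, dn)))
        (f := fun (st : Option (PySem.Dict String String × PySem.Dict String String)) kv =>
          st.bind (fun p =>
            if p.1.contains kv.1 then none
            else some (p.1.insert kv.1 ((PySem.Dict.ofList ds.1).getD kv.1 ""),
                       p.2.insert kv.1 ds.2)))
        (g := fun st kv =>
          st.bind (fun p =>
            if p.1.contains kv.1 then none
            else some (p.1.insert kv.1 kv.2, p.2.insert kv.1 ds.2)))
        (by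
          intro acc kv h'
          have hv : (PySem.Dict.ofList ds.1).getD kv.1 "" = kv.2 :=
            PySem.Dict.getD_of_mem_items (PySem.Dict.ofList ds.1)
              (by simpa using h') (PySem.Dict.nodup_keys_ofList ds.1) ""
          simp only [hv])
      have hinner :
          (PySem.Dict.ofList ds.1).keys.foldl
            (fun st key =>
              st.bind (fun p =>
                if p.1.contains key then none
                else some (p.1.insert key ((PySem.Dict.ofList ds.1).getD key ""),
                           p.2.insert key ds.2)))
            (some (dv, dn))
          = some ((PySem.Dict.ofList ds.1).items.foldl (fun a kv => a.insert kv.1 kv.2) dv,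
                  (PySem.Dict.ofList ds.1).items.foldl (fun a kv => a.insert kv.1 ds.2) dn) := by
        rw [hkd, List.foldl_map, hcongr]
        exact pv_inner_opt ds.2 _ dv dn hfresh (by rw [← hkd]; exact hndk)
      -- the node-side fold over keys is the fold over items
      have hnodekeys :
          (PySem.Dict.ofList ds.1).keys.foldl (fun a k => a.insert k ds.2) dn
          = (PySem.Dict.ofList ds.1).items.foldl (fun a kv => a.insert kv.1 ds.2) dn := by
        rw [hkd, List.foldl_map]
      -- new accumulator key lists
      have hkv : ((PySem.Dict.ofList ds.1).items.foldl (fun a kv => a.insert kv.1 kv.2) dv).keys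
          = dv.keys ++ (PySem.Dict.ofList ds.1).keys := by
        rw [pv_keys_var, ← hkd, pv_update_fresh _ _ (hnd2.sublist (List.sublist_append_left _ _))]
      have hkn : ((PySem.Dict.ofList ds.1).items.foldl (fun a kv => a.insert kv.1 ds.2) dn).keys
          = dn.keys ++ (PySem.Dict.ofList ds.1).keys := by
        rw [PySem.Dict.keys_foldl_insert_key _ Prod.fst (fun _ _ => ds.2) dn, ← hkd,
          pv_update_fresh _ _ (by rw [hkeys]; exact hnd2.sublist (List.sublist_append_left _ _))]
      have hrec := ih ((PySem.Dict.ofList ds.1).items.foldl (fun a kv => a.insert kv.1 kv.2) dv)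
        ((PySem.Dict.ofList ds.1).items.foldl (fun a kv => a.insert kv.1 ds.2) dn)
        (by rw [hkv]; simpa [List.append_assoc] using hnd')
        (by rw [hkv, hkn, hkeys])
      constructor
      · simp only [List.foldl_cons, hinner, hnodekeys]
        exact hrec.1
      · simp only [List.foldl_cons]
        rw [hrec.2, hkv]
        simp

-- ===== VERDICT (by name: the statement is the Claim_ definition above) =====
theorem get_slave_dicts_spec : Claim_equal_get_slave_dicts := by
  intro d_arr _ hpre
  unfold Spec_get_slave_dicts get_slave_dicts get_slave_dicts_alt pvLoopA
  have hmain := pv_main d_arr PySem.Dict.empty PySem.Dict.empty (by simpa [PySem.Dict.keys_empty] using hpre) rfl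
  rw [hmain.1]
  -- the duplicate check in B: total entry count = size of the merged dict
  have hsize : (d_arr.foldl (fun acc ds => (PySem.Dict.ofList ds.1).items.foldl (fun a kv => a.insert kv.1 kv.2) acc) PySem.Dict.empty).size
      = (d_arr.flatMap (fun ds => (PySem.Dict.ofList ds.1).keys)).length := by
    have hk := hmain.2
    have hs : ∀ d : PySem.Dict String String, d.size = d.keys.length := by
      intro d; simp [PySem.Dict.size, PySem.Dict.keys]
    rw [hs, hk]; simp [PySem.Dict.keys_empty]
  have htotal : d_arr.foldl (fun n ds => n + (PySem.Dict.ofList ds.1).size) (0 : Nat)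
      = (d_arr.flatMap (fun ds => (PySem.Dict.ofList ds.1).keys)).length := by
    rw [PySem.List.foldl_add_nat]
    simp [List.length_flatMap, PySem.Dict.size, PySem.Dict.keys]
  simp only [htotal, hsize]
  simp
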